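-- pv_equiv track=rewrite | github.com/josebelmiro/branch_bound | desatualizados/main_desatualizada.py | propagar_local
-- ===== SOURCE A (Python) =====
-- from collections import deque, defaultdict
--
-- def propagar_local(contador_vizinhos, grafo, start_vertices, atribuicoes, k):
--     fila = deque(start_vertices)
--     visitado = set(start_vertices)
--     # Isso evita realizar a verificação do próximo nível (1), pois já foi realizado em checar_vizinhos_afetados
--     nivel = 1
--
--     # processa nível 0 (opcional: checar os starts)
--     while fila and nivel <= k:
--         for _ in range(len(fila)):
--             v = fila.popleft()
--             val_v = atribuicoes[v]
--             if val_v != -1: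
--                 cont_v = contador_vizinhos[v]
--                 if val_v == 0:
--                     if cont_v.get(2, 0) == 0 and cont_v.get(-1, 0) == 0:
--                         return False
--                 elif val_v in (1, 2):
--                     if (cont_v.get(1, 0) + cont_v.get(2, 0)) == 0 and cont_v.get(-1, 0) == 0:
--                         return False
--
--             # enfileira próximos apenas se ainda não passamos do limite
--             if nivel < k:
--                 for u in grafo[v]:
--                     if u not in visitado and atribuicoes[u] != -1:
--                         visitado.add(u)
--                         fila.append(u)
--         nivel += 1
--     return True
-- ===== SOURCE B (Python) =====
-- # B: round-based saturation (iterated full-rescan closure) instead of A's queue BFS: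
-- # no deque and no per-level batching; each round rescans the entire reached list and
-- # appends new admissible vertices (re-scanned old vertices contribute nothing since
-- # their neighbours are already in the membership set), stopping when a round adds
-- # nothing or the depth budget is spent; the constraint check is one aggregate pass
-- # at the end. Uses dict.get throughout, so B is total where A may raise KeyError.
-- def _ok(contador_vizinhos, atribuicoes, v):
--     val = atribuicoes.get(v)
--     if val == 0:
--         cont = contador_vizinhos.get(v, {})
--         return cont.get(2, 0) != 0 or cont.get(-1, 0) != 0
--     if val == 1 or val == 2:
--         cont = contador_vizinhos.get(v, {})
--         return cont.get(1, 0) + cont.get(2, 0) != 0 or cont.get(-1, 0) != 0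
--     return True
--
-- def propagar_local(contador_vizinhos, grafo, start_vertices, atribuicoes, k):
--     if k < 1:
--         return True  # depth budget admits no level at all
--     reached = list(start_vertices)
--     membro = set(start_vertices)
--     rodada = 1
--     cresceu = True
--     while cresceu and rodada < k:
--         tamanho = len(reached)
--         for i in range(tamanho):
--             for u in grafo.get(reached[i], []):
--                 if u not in membro and atribuicoes.get(u) != -1:
--                     membro.add(u)
--                     reached.append(u)
--         cresceu = len(reached) > tamanho
--         rodada += 1
--     return all(_ok(contador_vizinhos, atribuicoes, v) for v in reached)
-- ===== Notes on version B (the rewrite author's own statement) =====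
-- stated objective: alternative
-- what changed: A runs a queue BFS (deque, per-level batching via 'for _ in range(len(fila))', a global nivel counter, and inline constraint checks that early-return); B has no queue at all: it iterates rounds of full-rescan saturation (each round re-scans the entire reached list and appends new admissible vertices, stopping on no growth or when the depth budget is spent) and performs the constraint check once at the end as a single aggregate all() pass over the reached list.
-- outside the precondition, e.g. on propagar_local({}, {}, [0], {}, 1): A raises KeyError, B returns True; on propagar_local({0: {}}, {}, [0, 1], {0: 0}, 1): A returns False, B returns False
import Mathlib
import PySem

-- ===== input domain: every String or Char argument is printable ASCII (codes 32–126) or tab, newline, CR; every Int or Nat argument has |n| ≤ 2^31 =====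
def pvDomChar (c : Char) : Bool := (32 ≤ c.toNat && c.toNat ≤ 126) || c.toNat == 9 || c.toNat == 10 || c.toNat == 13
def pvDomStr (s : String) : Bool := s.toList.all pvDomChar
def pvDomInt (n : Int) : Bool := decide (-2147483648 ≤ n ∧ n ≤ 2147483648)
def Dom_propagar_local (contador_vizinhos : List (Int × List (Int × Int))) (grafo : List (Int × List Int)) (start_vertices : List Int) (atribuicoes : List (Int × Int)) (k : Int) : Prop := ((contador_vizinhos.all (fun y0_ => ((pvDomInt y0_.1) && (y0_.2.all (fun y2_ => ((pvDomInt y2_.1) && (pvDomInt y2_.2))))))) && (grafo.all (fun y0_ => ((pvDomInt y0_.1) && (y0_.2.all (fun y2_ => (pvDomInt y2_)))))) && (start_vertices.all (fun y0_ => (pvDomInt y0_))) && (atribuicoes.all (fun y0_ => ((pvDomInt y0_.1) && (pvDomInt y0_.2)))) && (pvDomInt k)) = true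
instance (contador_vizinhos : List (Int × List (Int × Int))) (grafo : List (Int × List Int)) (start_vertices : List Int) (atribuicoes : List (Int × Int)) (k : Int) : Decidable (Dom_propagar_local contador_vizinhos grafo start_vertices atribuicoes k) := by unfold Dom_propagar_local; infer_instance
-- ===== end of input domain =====

-- B replaces A's queue BFS (deque + per-level batching + inline early-return checks) by
-- round-based saturation: rescan the whole reached list each round, then one aggregate
-- check at the end. Equivalence of the RETURN values is proved on Pre_ (the dict keys
-- Python A's traversal needs are present). No argument is mutated by either program.

-- Shared helpers (the same Python expressions occur verbatim in both sources).
-- 'u not in <set> and atribuicoes[u] != -1 / atribuicoes.get(u) != -1 : <list>.append(u); <set>.add(u)'.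
-- A's 'atribuicoes[u]' raises KeyError on a missing key (outside Pre_); the port treats
-- none like B's .get(u) (None != -1 is True) there.
def pvEnq (atribuicoes : List (Int × Int)) (p : List Int × PySem.Set Int) (u : Int) : List Int × PySem.Set Int :=
  if !(PySem.Set.contains p.2 u) && !(PySem.Dict.get? (PySem.Dict.mk atribuicoes) u == some (-1))
  then (p.1 ++ [u], PySem.Set.add p.2 u) else p

-- grafo[v] (A; KeyError outside Pre_) / grafo.get(v, []) (B)
def pvAdj (grafo : List (Int × List Int)) (v : Int) : List Int :=
  PySem.Dict.getD (PySem.Dict.mk grafo) v []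

-- ===== PORT A =====
-- the per-vertex violation test of A's loop body; atribuicoes[v] / contador_vizinhos[v]
-- raise KeyError on a missing key (outside Pre_): the port skips / counts-as-empty there.
def pvViol (contador_vizinhos : List (Int × List (Int × Int))) (atribuicoes : List (Int × Int)) (v : Int) : Bool :=
  match PySem.Dict.get? (PySem.Dict.mk atribuicoes) v with
  | none => false
  | some val =>
    if val == -1 then false
    else
      let cv := PySem.Dict.mk (PySem.Dict.getD (PySem.Dict.mk contador_vizinhos) v [])
      if val == 0 then
        (PySem.Dict.getD cv 2 0 == 0) && (PySem.Dict.getD cv (-1) 0 == 0)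
      else if val == 1 || val == 2 then
        ((PySem.Dict.getD cv 1 0 + PySem.Dict.getD cv 2 0) == 0) && (PySem.Dict.getD cv (-1) 0 == 0)
      else false

-- A's inner 'for _ in range(len(fila))': the len(fila) popped vertices are exactly the current
-- level list; appended vertices accumulate in nxt (they become the next level).
-- 'expand' is the loop-constant test 'nivel < k' of that sweep; 'return False' is the none case.
def pvAInner (contador_vizinhos : List (Int × List (Int × Int))) (grafo : List (Int × List Int)) (atribuicoes : List (Int × Int)) (expand : Bool) : List Int → PySem.Set Int → List Int → Option (List Int × PySem.Set Int)
  | [], vis, nxt => some (nxt, vis)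
  | v :: rest, vis, nxt =>
    if pvViol contador_vizinhos atribuicoes v then none
    else if expand then
      let p := (pvAdj grafo v).foldl (pvEnq atribuicoes) (nxt, vis)
      pvAInner contador_vizinhos grafo atribuicoes expand rest p.2 p.1
    else pvAInner contador_vizinhos grafo atribuicoes expand rest vis nxt

-- A's outer 'while fila and nivel <= k'. nivel is carried as fuel = (k - nivel + 1).toNat
-- (nivel starts at 1, so fuel starts at k.toNat); the guards 'nivel <= k' / 'nivel < k'
-- are exactly 'fuel > 0' / 'fuel > 1' — an exact reparametrisation of the counter.
def pvAOuter (contador_vizinhos : List (Int × List (Int × Int))) (grafo : List (Int × List Int)) (atribuicoes : List (Int × Int)) : Nat → List Int → PySem.Set Int → Bool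
  | 0, _, _ => true
  | f + 1, fila, vis =>
    if fila.isEmpty then true
    else
      match pvAInner contador_vizinhos grafo atribuicoes (decide (0 < f)) fila vis [] with
      | none => false
      | some (nxt, vis') => pvAOuter contador_vizinhos grafo atribuicoes f nxt vis'

def propagar_local (contador_vizinhos : List (Int × List (Int × Int))) (grafo : List (Int × List Int)) (start_vertices : List Int) (atribuicoes : List (Int × Int)) (k : Int) : Bool :=
  pvAOuter contador_vizinhos grafo atribuicoes k.toNat start_vertices (PySem.Set.ofList start_vertices)

-- ===== PORT B =====
-- Source B's _ok (all lookups via .get, total)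
def pvOk (contador_vizinhos : List (Int × List (Int × Int))) (atribuicoes : List (Int × Int)) (v : Int) : Bool :=
  let val := PySem.Dict.get? (PySem.Dict.mk atribuicoes) v
  if val == some 0 then
    let cont := PySem.Dict.mk (PySem.Dict.getD (PySem.Dict.mk contador_vizinhos) v [])
    !(PySem.Dict.getD cont 2 0 == 0) || !(PySem.Dict.getD cont (-1) 0 == 0)
  else if val == some 1 || val == some 2 then
    let cont := PySem.Dict.mk (PySem.Dict.getD (PySem.Dict.mk contador_vizinhos) v [])
    !(PySem.Dict.getD cont 1 0 + PySem.Dict.getD cont 2 0 == 0) || !(PySem.Dict.getD cont (-1) 0 == 0)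
  else true

-- Source B's one round: 'for i in range(tamanho): for u in grafo.get(reached[i], []): …' —
-- range(tamanho) is the snapshot of reached at round start; appends go to the state.
def pvExpand (grafo : List (Int × List Int)) (atribuicoes : List (Int × Int)) (snapshot : List Int) (p0 : List Int × PySem.Set Int) : List Int × PySem.Set Int :=
  snapshot.foldl (fun p v => (pvAdj grafo v).foldl (pvEnq atribuicoes) p) p0

-- Source B's 'while cresceu and rodada < k' loop; fuel = (k - rodada).toNat, rodada starts at 1;
-- 'cresceu' is the growth test len(reached) > tamanho.
def pvBLoop (grafo : List (Int × List Int)) (atribuicoes : List (Int × Int)) : Nat → List Int → PySem.Set Int → List Int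
  | 0, reached, _ => reached
  | f + 1, reached, membro =>
    let p := pvExpand grafo atribuicoes reached (reached, membro)
    if reached.length < p.1.length then pvBLoop grafo atribuicoes f p.1 p.2 else p.1

def propagar_local_alt (contador_vizinhos : List (Int × List (Int × Int))) (grafo : List (Int × List Int)) (start_vertices : List Int) (atribuicoes : List (Int × Int)) (k : Int) : Bool :=
  if k < 1 then true
  else
    (pvBLoop grafo atribuicoes (k - 1).toNat start_vertices (PySem.Set.ofList start_vertices)).all
      (fun v => pvOk contador_vizinhos atribuicoes v)

-- ===== PRECONDITION & SPEC =====
-- Pre_ excludes the instances on which Python A raises KeyError: a vertex its BFS touches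
-- with no entry in atribuicoes / contador_vizinhos / grafo. It is closed-form, so it
-- conservatively asks for keys of ALL start and adjacency-listed vertices, thereby also
-- excluding some malformed instances on which A happens to return (False before reaching
-- the missing key, or the bad vertex is unreachable); B is total via .get and returns A's
-- exact value on those excluded returning inputs too (see cites).
def Pre_propagar_local (contador_vizinhos : List (Int × List (Int × Int))) (grafo : List (Int × List Int)) (start_vertices : List Int) (atribuicoes : List (Int × Int)) (k : Int) : Prop :=
  k < 1 ∨ start_vertices = [] ∨
  ((∀ v ∈ start_vertices,
      PySem.Dict.contains (PySem.Dict.mk atribuicoes) v = true ∧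
      (PySem.Dict.getD (PySem.Dict.mk atribuicoes) v (-1) ≠ -1 →
        PySem.Dict.contains (PySem.Dict.mk contador_vizinhos) v = true) ∧
      (2 ≤ k → PySem.Dict.contains (PySem.Dict.mk grafo) v = true)) ∧
   (2 ≤ k → ∀ p ∈ grafo, ∀ u ∈ p.2,
      u ∈ start_vertices ∨
      (PySem.Dict.contains (PySem.Dict.mk atribuicoes) u = true ∧
       (PySem.Dict.getD (PySem.Dict.mk atribuicoes) u (-1) ≠ -1 →
         PySem.Dict.contains (PySem.Dict.mk contador_vizinhos) u = true ∧
         (3 ≤ k → PySem.Dict.contains (PySem.Dict.mk grafo) u = true)))))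
instance (contador_vizinhos : List (Int × List (Int × Int))) (grafo : List (Int × List Int)) (start_vertices : List Int) (atribuicoes : List (Int × Int)) (k : Int) : Decidable (Pre_propagar_local contador_vizinhos grafo start_vertices atribuicoes k) := by unfold Pre_propagar_local; infer_instance

def pvWitness_propagar_local : (List (Int × List (Int × Int))) × (List (Int × List Int)) × List Int × (List (Int × Int)) × Int :=
  ([(0, [(-1, 1)])], [(0, [])], [0], [(0, 0)], 1)

def Spec_propagar_local (contador_vizinhos : List (Int × List (Int × Int))) (grafo : List (Int × List Int)) (start_vertices : List Int) (atribuicoes : List (Int × Int)) (k : Int) (out : Bool) : Prop := out = propagar_local_alt contador_vizinhos grafo start_vertices atribuicoes k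
instance (contador_vizinhos : List (Int × List (Int × Int))) (grafo : List (Int × List Int)) (start_vertices : List Int) (atribuicoes : List (Int × Int)) (k : Int) (out : Bool) : Decidable (Spec_propagar_local contador_vizinhos grafo start_vertices atribuicoes k out) := by unfold Spec_propagar_local; infer_instance

-- ===== CLAIM (what is proved, stated in full; the proofs are below) =====
def Claim_equal_propagar_local : Prop := ∀ (contador_vizinhos : List (Int × List (Int × Int))) (grafo : List (Int × List Int)) (start_vertices : List Int) (atribuicoes : List (Int × Int)) (k : Int), Dom_propagar_local contador_vizinhos grafo start_vertices atribuicoes k → Pre_propagar_local contador_vizinhos grafo start_vertices atribuicoes k → Spec_propagar_local contador_vizinhos grafo start_vertices atribuicoes k (propagar_local contador_vizinhos grafo start_vertices atribuicoes k)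

-- ===== LEMMAS AND PROOFS =====

-- Source B's check is the negation of A's inline check, vertex by vertex.
theorem pvOk_eq_not_viol (contador_vizinhos : List (Int × List (Int × Int))) (atribuicoes : List (Int × Int)) (v : Int) :
    pvOk contador_vizinhos atribuicoes v = !pvViol contador_vizinhos atribuicoes v := by
  unfold pvOk pvViol
  rcases h : PySem.Dict.get? (PySem.Dict.mk atribuicoes) v with _ | val
  · simp
  · by_cases h0 : val = 0 <;> by_cases h1 : val = 1 <;> by_cases h2 : val = 2 <;>
      simp [h0, h1, h2]

-- Set membership is monotone along one pvEnq step…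
theorem pvSet_contains_add (s : PySem.Set Int) (u x : Int)
    (h : PySem.Set.contains s x = true) : PySem.Set.contains (PySem.Set.add s u) x = true := by
  have hx : x ∈ s := by simpa [PySem.Set.contains] using h
  simpa [PySem.Set.contains] using (PySem.Set.mem_add s u x).mpr (Or.inl hx)

theorem pvEnq_contains_mono (atribuicoes : List (Int × Int)) (p : List Int × PySem.Set Int) (u x : Int)
    (h : PySem.Set.contains p.2 x = true) : PySem.Set.contains (pvEnq atribuicoes p u).2 x = true := by
  unfold pvEnq
  split_ifs with hg
  · exact pvSet_contains_add _ _ _ h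
  · exact h

-- …along a fold of pvEnq over an adjacency list…
theorem pvEnqFold_contains_mono (atribuicoes : List (Int × Int)) (l : List Int) : ∀ (p : List Int × PySem.Set Int) (x : Int),
    PySem.Set.contains p.2 x = true → PySem.Set.contains (l.foldl (pvEnq atribuicoes) p).2 x = true := by
  induction l with
  | nil => intro p x h; exact h
  | cons u rest ih =>
    intro p x h
    rw [List.foldl_cons]
    exact ih _ _ (pvEnq_contains_mono _ _ _ _ h)

-- …and along a whole round (pvExpand).
theorem pvExpand_contains_mono (grafo : List (Int × List Int)) (atribuicoes : List (Int × Int)) (snapshot : List Int) : ∀ (p : List Int × PySem.Set Int) (x : Int),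
    PySem.Set.contains p.2 x = true → PySem.Set.contains (pvExpand grafo atribuicoes snapshot p).2 x = true := by
  induction snapshot with
  | nil => intro p x h; exact h
  | cons v rest ih =>
    intro p x h
    exact ih _ _ (pvEnqFold_contains_mono _ _ _ _ h)

-- after folding pvEnq over a list, every element of that list is in the set or filtered out.
theorem pvEnqFold_covers (atribuicoes : List (Int × Int)) (l : List Int) : ∀ (p : List Int × PySem.Set Int), ∀ u ∈ l,
    PySem.Set.contains ((l.foldl (pvEnq atribuicoes) p)).2 u = true ∨ PySem.Dict.get? (PySem.Dict.mk atribuicoes) u = some (-1) := by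
  induction l with
  | nil => intro p u hu; cases hu
  | cons w rest ih =>
    intro p u hu
    rw [List.foldl_cons]
    rcases List.mem_cons.mp hu with rfl | hu
    · by_cases hc : PySem.Set.contains p.2 u = true
      · exact Or.inl (pvEnqFold_contains_mono _ _ _ _ (pvEnq_contains_mono _ _ _ _ hc))
      · by_cases ha : PySem.Dict.get? (PySem.Dict.mk atribuicoes) u = some (-1)
        · exact Or.inr ha
        · left
          apply pvEnqFold_contains_mono
          have hm : u ∉ p.2 := by simpa [PySem.Set.contains] using hc
          have hstep : pvEnq atribuicoes p u = (p.1 ++ [u], PySem.Set.add p.2 u) := by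
            unfold pvEnq
            rw [if_pos (by simp [PySem.Set.contains, hm, ha])]
          rw [hstep]
          have hmem : u ∈ PySem.Set.add p.2 u := (PySem.Set.mem_add p.2 u u).mpr (Or.inr rfl)
          simp [PySem.Set.contains, hmem]
    · exact ih _ u hu

-- saturation: every vertex of 'done' has all of its admissible neighbours already in the set.
def pvSat (grafo : List (Int × List Int)) (atribuicoes : List (Int × Int)) (done : List Int) (s : PySem.Set Int) : Prop :=
  ∀ v ∈ done, ∀ u ∈ pvAdj grafo v,
    PySem.Set.contains s u = true ∨ PySem.Dict.get? (PySem.Dict.mk atribuicoes) u = some (-1)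

-- folding pvEnq over a fully covered adjacency list does nothing.
theorem pvEnqFold_noop (atribuicoes : List (Int × Int)) (l : List Int) : ∀ (p : List Int × PySem.Set Int),
    (∀ u ∈ l, PySem.Set.contains p.2 u = true ∨ PySem.Dict.get? (PySem.Dict.mk atribuicoes) u = some (-1)) →
    l.foldl (pvEnq atribuicoes) p = p := by
  induction l with
  | nil => intro p _; rfl
  | cons u rest ih =>
    intro p h
    have hstep : pvEnq atribuicoes p u = p := by
      unfold pvEnq
      rcases h u (List.mem_cons_self) with hc | ha
      · have hm : u ∈ p.2 := by simpa [PySem.Set.contains] using hc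
        rw [if_neg (by simp [PySem.Set.contains, hm])]
      · rw [if_neg (by simp [ha])]
    rw [List.foldl_cons, hstep]
    exact ih p (fun w hw => h w (List.mem_cons_of_mem _ hw))

-- expanding a saturated prefix is a no-op.
theorem pvExpand_noop (grafo : List (Int × List Int)) (atribuicoes : List (Int × Int)) (done : List Int) : ∀ (p : List Int × PySem.Set Int),
    pvSat grafo atribuicoes done p.2 → pvExpand grafo atribuicoes done p = p := by
  induction done with
  | nil => intro p _; rfl
  | cons v rest ih =>
    intro p h
    have hstep : (pvAdj grafo v).foldl (pvEnq atribuicoes) p = p :=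
      pvEnqFold_noop _ _ _ (h v (List.mem_cons_self))
    unfold pvExpand
    rw [List.foldl_cons, hstep]
    exact ih p (fun w hw => h w (List.mem_cons_of_mem _ hw))

-- the list component of a pvEnq fold only ever appends; the set component ignores the list prefix.
theorem pvEnqFold_shift (atribuicoes : List (Int × Int)) (l : List Int) : ∀ (a nxt : List Int) (s : PySem.Set Int),
    l.foldl (pvEnq atribuicoes) (a ++ nxt, s) =
      (a ++ (l.foldl (pvEnq atribuicoes) (nxt, s)).1, (l.foldl (pvEnq atribuicoes) (nxt, s)).2) := by
  induction l with
  | nil => intro a nxt s; rfl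
  | cons u rest ih =>
    intro a nxt s
    rw [List.foldl_cons, List.foldl_cons]
    by_cases hg : (!(PySem.Set.contains s u) && !(PySem.Dict.get? (PySem.Dict.mk atribuicoes) u == some (-1))) = true
    · rw [show pvEnq atribuicoes (a ++ nxt, s) u = (a ++ (nxt ++ [u]), PySem.Set.add s u) from by
          unfold pvEnq; rw [if_pos hg, List.append_assoc],
        show pvEnq atribuicoes (nxt, s) u = (nxt ++ [u], PySem.Set.add s u) from by
          unfold pvEnq; rw [if_pos hg]]
      exact ih a (nxt ++ [u]) _
    · rw [show pvEnq atribuicoes (a ++ nxt, s) u = (a ++ nxt, s) from by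
          unfold pvEnq; rw [if_neg hg],
        show pvEnq atribuicoes (nxt, s) u = (nxt, s) from by
          unfold pvEnq; rw [if_neg hg]]
      exact ih a nxt s

-- the same for a whole round.
theorem pvExpand_shift (grafo : List (Int × List Int)) (atribuicoes : List (Int × Int)) (snapshot : List Int) : ∀ (a nxt : List Int) (s : PySem.Set Int),
    pvExpand grafo atribuicoes snapshot (a ++ nxt, s) =
      (a ++ (pvExpand grafo atribuicoes snapshot (nxt, s)).1, (pvExpand grafo atribuicoes snapshot (nxt, s)).2) := by
  induction snapshot with
  | nil => intro a nxt s; rfl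
  | cons v rest ih =>
    intro a nxt s
    unfold pvExpand
    rw [List.foldl_cons, List.foldl_cons, pvEnqFold_shift]
    exact ih a _ _

-- after a round over 'frontier', 'frontier' itself is saturated.
theorem pvExpand_sat (grafo : List (Int × List Int)) (atribuicoes : List (Int × Int)) (frontier : List Int) : ∀ (p : List Int × PySem.Set Int),
    pvSat grafo atribuicoes frontier (pvExpand grafo atribuicoes frontier p).2 := by
  induction frontier with
  | nil => intro p v hv; cases hv
  | cons v rest ih =>
    intro p w hw u hu
    have hstep : pvExpand grafo atribuicoes (v :: rest) p =
        pvExpand grafo atribuicoes rest ((pvAdj grafo v).foldl (pvEnq atribuicoes) p) := by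
      unfold pvExpand; rw [List.foldl_cons]
    rw [hstep]
    rcases List.mem_cons.mp hw with rfl | hw
    · rcases pvEnqFold_covers atribuicoes (pvAdj grafo w) p u hu with hc | ha
      · exact Or.inl (pvExpand_contains_mono _ _ _ _ _ hc)
      · exact Or.inr ha
    · exact ih _ w hw u hu

-- the collection of everything B still appends from a frontier (pure level expansion).
def pvC (grafo : List (Int × List Int)) (atribuicoes : List (Int × Int)) : Nat → List Int → PySem.Set Int → List Int
  | 0, _, _ => []
  | f + 1, frontier, membro =>
    let p := pvExpand grafo atribuicoes frontier ([], membro)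
    if p.1.isEmpty then [] else p.1 ++ pvC grafo atribuicoes f p.1 p.2

theorem pvC_zero (grafo : List (Int × List Int)) (atribuicoes : List (Int × Int)) (frontier : List Int) (membro : PySem.Set Int) :
    pvC grafo atribuicoes 0 frontier membro = [] := rfl

theorem pvC_nil (grafo : List (Int × List Int)) (atribuicoes : List (Int × Int)) (f : Nat) (membro : PySem.Set Int) :
    pvC grafo atribuicoes f [] membro = [] := by cases f <;> rfl

theorem pvC_succ (grafo : List (Int × List Int)) (atribuicoes : List (Int × Int)) (f : Nat) (frontier : List Int) (membro : PySem.Set Int) :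
    pvC grafo atribuicoes (f + 1) frontier membro =
      if (pvExpand grafo atribuicoes frontier ([], membro)).1.isEmpty then []
      else (pvExpand grafo atribuicoes frontier ([], membro)).1 ++
        pvC grafo atribuicoes f (pvExpand grafo atribuicoes frontier ([], membro)).1
          (pvExpand grafo atribuicoes frontier ([], membro)).2 := rfl

-- Main B-side invariant: from a reached list that splits into a saturated prefix and a
-- frontier suffix, B's loop returns the reached list followed by the level-collection.
theorem pvBLoop_split (grafo : List (Int × List Int)) (atribuicoes : List (Int × Int)) : ∀ (f : Nat) (done frontier : List Int) (membro : PySem.Set Int),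
    pvSat grafo atribuicoes done membro →
    pvBLoop grafo atribuicoes f (done ++ frontier) membro =
      done ++ frontier ++ pvC grafo atribuicoes f frontier membro := by
  intro f
  induction f with
  | zero => intro done frontier membro _; simp [pvBLoop, pvC_zero]
  | succ f ih =>
    intro done frontier membro hsat
    have hdone : pvExpand grafo atribuicoes done (done ++ frontier, membro) = (done ++ frontier, membro) :=
      pvExpand_noop _ _ _ _ hsat
    have hsplit : pvExpand grafo atribuicoes (done ++ frontier) (done ++ frontier, membro) =
        ((done ++ frontier) ++ (pvExpand grafo atribuicoes frontier ([], membro)).1,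
         (pvExpand grafo atribuicoes frontier ([], membro)).2) := by
      unfold pvExpand
      rw [List.foldl_append]
      have : List.foldl (fun p v => (pvAdj grafo v).foldl (pvEnq atribuicoes) p) (done ++ frontier, membro) done = (done ++ frontier, membro) := hdone
      rw [this]
      have := pvExpand_shift grafo atribuicoes frontier (done ++ frontier) [] membro
      simpa [pvExpand] using this
    set q := pvExpand grafo atribuicoes frontier ([], membro) with hq
    unfold pvBLoop
    rw [hsplit]
    by_cases hempty : q.1 = []
    · have hlen : ¬ ((done ++ frontier).length < ((done ++ frontier) ++ q.1).length) := by
        simp [hempty]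
      rw [if_neg hlen, pvC_succ, ← hq, if_pos (List.isEmpty_iff.mpr hempty)]
      simp [hempty]
    · have hlen : (done ++ frontier).length < ((done ++ frontier) ++ q.1).length := by
        have : 0 < q.1.length := List.length_pos_iff.mpr hempty
        simp [List.length_append]; omega
      rw [if_pos hlen]
      have hsat' : pvSat grafo atribuicoes (done ++ frontier) q.2 := by
        intro v hv u hu
        rcases List.mem_append.mp hv with hv | hv
        · rcases hsat v hv u hu with hc | ha
          · exact Or.inl (pvExpand_contains_mono _ _ _ _ _ hc)
          · exact Or.inr ha
        · exact pvExpand_sat grafo atribuicoes frontier ([], membro) v hv u hu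
      rw [ih (done ++ frontier) q.1 q.2 hsat', pvC_succ, ← hq,
          if_neg (by simpa using hempty)]
      simp [List.append_assoc]

-- A-side: the inner sweep with expansion is 'none' iff some popped vertex violates,
-- otherwise exactly one pvExpand-shaped expansion of the level.
theorem pvAInner_true (contador_vizinhos : List (Int × List (Int × Int))) (grafo : List (Int × List Int)) (atribuicoes : List (Int × Int)) : ∀ (l : List Int) (vis : PySem.Set Int) (nxt : List Int),
    pvAInner contador_vizinhos grafo atribuicoes true l vis nxt =
      if l.any (pvViol contador_vizinhos atribuicoes) then none
      else some (pvExpand grafo atribuicoes l (nxt, vis)) := by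
  intro l
  induction l with
  | nil => intro vis nxt; rfl
  | cons v rest ih =>
    intro vis nxt
    by_cases hv : pvViol contador_vizinhos atribuicoes v
    · simp [pvAInner, hv]
    · simp [pvAInner, hv, ih, pvExpand]

-- the inner sweep without expansion (last level, nivel = k).
theorem pvAInner_false (contador_vizinhos : List (Int × List (Int × Int))) (grafo : List (Int × List Int)) (atribuicoes : List (Int × Int)) : ∀ (l : List Int) (vis : PySem.Set Int) (nxt : List Int),
    pvAInner contador_vizinhos grafo atribuicoes false l vis nxt =
      if l.any (pvViol contador_vizinhos atribuicoes) then none else some (nxt, vis) := by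
  intro l
  induction l with
  | nil => intro vis nxt; rfl
  | cons v rest ih =>
    intro vis nxt
    by_cases hv : pvViol contador_vizinhos atribuicoes v
    · simp [pvAInner, hv]
    · simp [pvAInner, hv, ih]

theorem pvAOuter_nil (contador_vizinhos : List (Int × List (Int × Int))) (grafo : List (Int × List Int)) (atribuicoes : List (Int × Int)) (n : Nat) (vis : PySem.Set Int) :
    pvAOuter contador_vizinhos grafo atribuicoes n [] vis = true := by
  cases n <;> rfl

-- A's remaining run from a level equals B's aggregate check over that level plus everything
-- the level collection still reaches.
theorem pvMain (contador_vizinhos : List (Int × List (Int × Int))) (grafo : List (Int × List Int)) (atribuicoes : List (Int × Int)) : ∀ (f : Nat) (frontier : List Int) (membro : PySem.Set Int),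
    pvAOuter contador_vizinhos grafo atribuicoes (f + 1) frontier membro =
      (frontier ++ pvC grafo atribuicoes f frontier membro).all (fun v => !pvViol contador_vizinhos atribuicoes v) := by
  intro f
  induction f with
  | zero =>
    intro frontier membro
    by_cases h : frontier.isEmpty
    · rw [List.isEmpty_iff.mp h]; simp [pvAOuter, pvC_zero]
    · unfold pvAOuter
      rw [if_neg (by simpa using h),
          show (decide ((0:Nat) < 0)) = false from by decide, pvAInner_false]
      by_cases ha : frontier.any (pvViol contador_vizinhos atribuicoes)
      · simp [ha, pvC_zero, List.all_eq_not_any_not]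
      · simp only [ha, if_neg Bool.false_ne_true]
        rw [pvAOuter_nil]
        simp [pvC_zero, List.all_eq_not_any_not, ha]
  | succ f ih =>
    intro frontier membro
    by_cases h : frontier.isEmpty
    · rw [List.isEmpty_iff.mp h]; simp [pvAOuter, pvC_succ, pvExpand]
    · unfold pvAOuter
      rw [if_neg (by simpa using h),
          show (decide (0 < f + 1)) = true from by simp, pvAInner_true]
      by_cases ha : frontier.any (pvViol contador_vizinhos atribuicoes)
      · simp [ha, List.all_eq_not_any_not]
      · simp only [ha, if_neg Bool.false_ne_true]
        set q := pvExpand grafo atribuicoes frontier ([], membro) with hq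
        rw [ih q.1 q.2, pvC_succ, ← hq]
        by_cases hempty : q.1 = []
        · rw [if_pos (List.isEmpty_iff.mpr hempty), hempty]
          simp [pvC_nil, List.all_eq_not_any_not, ha]
        · rw [if_neg (by simpa using hempty)]
          simp [List.all_eq_not_any_not, ha]

-- ===== VERDICT (by name: the statement is the Claim_ definition above) =====
theorem propagar_local_spec : Claim_equal_propagar_local := by
  intro contador_vizinhos grafo start_vertices atribuicoes k _ _
  unfold Spec_propagar_local propagar_local propagar_local_alt
  by_cases hk : k < 1
  · have h0 : k.toNat = 0 := by omega
    simp [h0, hk, pvAOuter]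
  · have hkt : k.toNat = (k - 1).toNat + 1 := by omega
    rw [if_neg hk, hkt, pvMain,
        show start_vertices = [] ++ start_vertices from rfl,
        pvBLoop_split grafo atribuicoes ((k-1).toNat) [] start_vertices _ (by intro v hv; cases hv)]
    simp only [List.nil_append]
    have hfun : (fun v => pvOk contador_vizinhos atribuicoes v) = (fun v => !pvViol contador_vizinhos atribuicoes v) :=
      funext (fun v => pvOk_eq_not_viol contador_vizinhos atribuicoes v)
    rw [hfun]
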